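-- pv_equiv track=rewrite | github.com/haianhng31/Haiku-Poem-Generator | make_haiku.py | markov_model_2
-- ===== SOURCE A (Python) =====
-- def markov_model_2(corpus):
--     markov_2 = {}
--     corpus = list(corpus)
--     for i in range(len(corpus) - 2):
--         key = " ".join([corpus[i],corpus[i+1]])
--         if key not in markov_2.keys():
--             markov_2[key] = [corpus[i+2]]
--         else:
--             markov_2[key].append(corpus[i+2])
--     sorted_markov_2 = {word:markov_2[word] for word in sorted(markov_2)}
--     return sorted_markov_2
-- ===== SOURCE B (Python) =====
-- def markov_model_2(corpus):
--     corpus = list(corpus)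
--     trans = [(" ".join((a, b)), c) for a, b, c in zip(corpus, corpus[1:], corpus[2:])]
--     trans.sort(key=lambda p: p[0])
--     groups = []
--     for k, v in trans:
--         if groups and groups[-1][0] == k:
--             groups[-1][1].append(v)
--         else:
--             groups.append((k, [v]))
--     return {k: vs for k, vs in groups}
-- ===== Notes on version B (the rewrite author's own statement) =====
-- stated objective: alternative
-- what changed: B lists the (bigram, next-word) transitions by zipping the corpus with its two shifts, stable-sorts that list by key once, then builds the grouped result in a single pass over adjacent equal keys, instead of A's index loop that groups into a hash map first and sorts the keys afterwards.
import Mathlib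
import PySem

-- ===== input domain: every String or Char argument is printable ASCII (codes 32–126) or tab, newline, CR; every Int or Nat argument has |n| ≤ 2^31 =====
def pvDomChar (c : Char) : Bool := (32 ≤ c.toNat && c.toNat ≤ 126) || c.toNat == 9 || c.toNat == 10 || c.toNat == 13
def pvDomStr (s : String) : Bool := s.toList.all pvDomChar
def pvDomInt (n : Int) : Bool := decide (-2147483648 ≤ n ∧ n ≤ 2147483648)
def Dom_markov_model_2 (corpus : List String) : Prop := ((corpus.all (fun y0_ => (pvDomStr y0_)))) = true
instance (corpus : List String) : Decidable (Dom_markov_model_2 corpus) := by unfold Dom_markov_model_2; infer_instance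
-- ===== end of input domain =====

-- B replaces A's hash-map grouping + key sort by: emit all (bigram, next-word) transitions,
-- stable-sort them by key once, and build the grouped result in one pass over adjacent equal keys
-- (objective: alternative, same asymptotic cost).

-- ===== PORT A =====
def markov_model_2 (corpus : List String) : List (String × List String) :=
  let markov_2 : PySem.Dict String (List String) :=
    (PySem.List.pyRange 0 ((corpus.length : Int) - 2)).foldl
      (fun d i =>
        let key := PySem.Str.join " " [PySem.List.pyGetD corpus i "", PySem.List.pyGetD corpus (i + 1) ""]
        if d.contains key = false then d.insert key [PySem.List.pyGetD corpus (i + 2) ""]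
        else d.modify key [] (fun v => v ++ [PySem.List.pyGetD corpus (i + 2) ""]))
      PySem.Dict.empty
  -- dict comprehension over sorted(markov_2); markov_2[word] is getD (the key is always present)
  ((PySem.List.sorted markov_2.keys (fun w => w) false).foldl
      (fun d w => d.insert w (markov_2.getD w [])) PySem.Dict.empty).items

-- ===== PORT B =====
-- the body of B's 'for k, v in trans' grouping loop
def mm2Step (groups : List (String × List String)) (p : String × String) : List (String × List String) :=
  match groups.getLast? with
  | some last =>
      if last.1 == p.1 then groups.dropLast ++ [(last.1, last.2 ++ [p.2])]
      else groups ++ [(p.1, [p.2])]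
  | none => groups ++ [(p.1, [p.2])]

def markov_model_2_alt (corpus : List String) : List (String × List String) :=
  let trans :=
    (corpus.zip ((PySem.List.slice corpus (some 1) none).zip (PySem.List.slice corpus (some 2) none))).map
      (fun t => (PySem.Str.join " " [t.1, t.2.1], t.2.2))
  let trans := PySem.List.sorted trans (fun p => p.1) false
  let groups := trans.foldl mm2Step []
  (PySem.Dict.ofList groups).items

-- ===== PRECONDITION & SPEC =====
def Spec_markov_model_2 (corpus : List String) (out : List (String × List String)) : Prop := out = markov_model_2_alt corpus
instance (corpus : List String) (out : List (String × List String)) : Decidable (Spec_markov_model_2 corpus out) := by unfold Spec_markov_model_2; infer_instance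

-- ===== CLAIM (what is proved, stated in full; the proofs are below) =====
def Claim_equal_markov_model_2 : Prop := ∀ (corpus : List String), Dom_markov_model_2 corpus → Spec_markov_model_2 corpus (markov_model_2 corpus)

-- ===== LEMMAS AND PROOFS =====

-- the transition stream: (bigram key, following word), in corpus order
def mmTrans (l : List String) : List (String × String) :=
  (l.zip ((l.drop 1).zip (l.drop 2))).map
    (fun t => (PySem.Str.join " " [t.1, t.2.1], t.2.2))

-- the values recorded under one key
def mmVals (ts : List (String × String)) (k : String) : List String :=
  (ts.filter (fun p => p.1 == k)).map Prod.snd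

-- canonical form both programs compute
def mmCanon (ts : List (String × String)) : List (String × List String) :=
  (PySem.List.sorted (PySem.Set.ofList (ts.map Prod.fst)) (fun w => w) false).map
    (fun k => (k, mmVals ts k))

lemma mm_getD_empty (d : PySem.Dict String (List String)) (k : String)
    (h : d.contains k = false) : d.getD k [] = [] := by
  have hf : List.find? (fun p => p.1 == k) d.items = none := by
    rw [List.find?_eq_none]
    intro p hp hc
    have hcon : d.contains k = true := by
      simp only [PySem.Dict.contains, List.any_eq_true]
      exact ⟨p, hp, hc⟩
    simp [hcon] at h
  simp [PySem.Dict.getD, PySem.Dict.get?, hf]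

lemma mm_step_eq (d : PySem.Dict String (List String)) (p : String × String) :
    (if d.contains p.1 = false then d.insert p.1 [p.2]
     else d.modify p.1 [] (fun v => v ++ [p.2]))
    = d.modify p.1 [] (fun v => v ++ [p.2]) := by
  by_cases hc : d.contains p.1
  · simp [hc]
  · simp only [Bool.not_eq_true] at hc
    simp [hc, PySem.Dict.modify, mm_getD_empty d p.1 hc]

lemma mm_trans_map (l : List String) :
    (PySem.List.pyRange 0 ((l.length : Int) - 2)).map
      (fun i => (PySem.Str.join " " [PySem.List.pyGetD l i "", PySem.List.pyGetD l (i + 1) ""],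
                 PySem.List.pyGetD l (i + 2) "")) = mmTrans l := by
  by_cases h2 : 2 ≤ l.length
  · have hcast : (l.length : Int) - 2 = ((l.length - 2 : Nat) : Int) := by omega
    rw [hcast, PySem.List.pyRange_zero_natCast, List.map_map]
    apply List.ext_getElem
    · simp [mmTrans]; omega
    · intro i hi1 hi2
      have hi : i < l.length - 2 := by simpa using hi1
      have c0 : PySem.List.pyGetD l ((i : Nat) : Int) "" = l[i]'(by omega) := by
        rw [PySem.List.pyGetD_natCast]; exact List.getD_eq_getElem l "" (by omega)
      have e1 : ((i : Nat) : Int) + 1 = ((i + 1 : Nat) : Int) := by push_cast; ring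
      have e2 : ((i : Nat) : Int) + 2 = ((i + 2 : Nat) : Int) := by push_cast; ring
      have c1 : PySem.List.pyGetD l (((i : Nat) : Int) + 1) "" = l[i + 1]'(by omega) := by
        rw [e1, PySem.List.pyGetD_natCast]; exact List.getD_eq_getElem l "" (by omega)
      have c2 : PySem.List.pyGetD l (((i : Nat) : Int) + 2) "" = l[i + 2]'(by omega) := by
        rw [e2, PySem.List.pyGetD_natCast]; exact List.getD_eq_getElem l "" (by omega)
      simp only [List.getElem_map, List.getElem_range, Function.comp_apply, mmTrans,
        List.getElem_zip, List.getElem_drop, c0, c1, c2,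
        show 1 + i = i + 1 from Nat.add_comm 1 i, show 2 + i = i + 2 from Nat.add_comm 2 i]
  · rcases l with _ | ⟨a, _ | ⟨b, t⟩⟩
    · rfl
    · rfl
    · exfalso; simp at h2

lemma mm_dictA (l : List String) :
    (PySem.List.pyRange 0 ((l.length : Int) - 2)).foldl
      (fun d i =>
        let key := PySem.Str.join " " [PySem.List.pyGetD l i "", PySem.List.pyGetD l (i + 1) ""]
        if d.contains key = false then d.insert key [PySem.List.pyGetD l (i + 2) ""]
        else d.modify key [] (fun v => v ++ [PySem.List.pyGetD l (i + 2) ""]))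
      PySem.Dict.empty
    = (mmTrans l).foldl (fun d p => d.modify p.1 [] (fun v => v ++ [p.2])) PySem.Dict.empty := by
  rw [← mm_trans_map l, List.foldl_map]
  exact congrArg
    (fun f => List.foldl f (PySem.Dict.empty : PySem.Dict String (List String))
      (PySem.List.pyRange 0 ((l.length : Int) - 2)))
    (funext fun d => funext fun y =>
      mm_step_eq d (PySem.Str.join " " [PySem.List.pyGetD l y "", PySem.List.pyGetD l (y + 1) ""],
        PySem.List.pyGetD l (y + 2) ""))

lemma mm_A_eq_canon (l : List String) : markov_model_2 l = mmCanon (mmTrans l) := by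
  simp only [markov_model_2, mm_dictA l]
  set ts := mmTrans l with hts
  set dmod := List.foldl (fun d p => d.modify p.1 [] (fun v => v ++ [p.2]))
    (PySem.Dict.empty : PySem.Dict String (List String)) ts with hdmod
  have hkeys : dmod.keys = PySem.Set.ofList (ts.map Prod.fst) := by
    have h := PySem.Dict.keys_foldl_modify_key ts Prod.fst [] (fun _ p v => v ++ [p.2]) PySem.Dict.empty
    exact h
  have hnod : dmod.keys.Nodup := by
    exact PySem.Dict.nodup_keys_foldl_modify_key ts Prod.fst [] (fun _ p v => v ++ [p.2])
      PySem.Dict.empty (by simp [PySem.Dict.empty, PySem.Dict.keys])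
  have hgetD : ∀ k, dmod.getD k [] = mmVals ts k := by
    intro k
    have h := PySem.Dict.getD_foldl_modify_append ts PySem.Dict.empty k
    simpa [mmVals] using h
  have hitems := PySem.Dict.items_foldl_insert_fresh
    (PySem.List.sorted dmod.keys (fun w => w) false) (fun w => w) (fun w => dmod.getD w [])
    PySem.Dict.empty (by intro a _; rfl)
    (by
      have hperm := PySem.List.sorted_perm dmod.keys (fun w => w) false
      simpa using (hperm.nodup_iff.mpr hnod))
  rw [hitems]
  simp only [List.nil_append, PySem.Dict.empty]
  rw [hkeys]
  simp only [mmCanon, hgetD]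

-- ----- B side -----

lemma mm_insertBy_filter (x : String × String) (k : String) :
    ∀ (l : List (String × String)), l.Pairwise (fun a b => a.1 ≤ b.1) →
      (PySem.List.insertBy (fun a b => decide (a.1 < b.1)) x l).filter (fun p => p.1 == k)
      = l.filter (fun p => p.1 == k) ++ (if x.1 == k then [x] else []) := by
  intro l
  induction l with
  | nil =>
    intro _
    by_cases hx : x.1 = k <;> simp [PySem.List.insertBy, hx]
  | cons y ys ih =>
    intro h
    have hy : ∀ z ∈ ys, y.1 ≤ z.1 := (List.pairwise_cons.mp h).1
    have hys : ys.Pairwise (fun a b => a.1 ≤ b.1) := (List.pairwise_cons.mp h).2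
    have hstep : PySem.List.insertBy (fun a b => decide (a.1 < b.1)) x (y :: ys)
        = if x.1 < y.1 then x :: y :: ys
          else y :: PySem.List.insertBy (fun a b => decide (a.1 < b.1)) x ys := by
      simp [PySem.List.insertBy]
    rw [hstep]
    by_cases hb : x.1 < y.1
    · rw [if_pos hb]
      by_cases hx : x.1 = k
      · have hnil : (y :: ys).filter (fun p => p.1 == k) = [] := by
          rw [List.filter_eq_nil_iff]
          intro z hz
          have hlt : k < z.1 := by
            rcases List.mem_cons.mp hz with rfl | hz'
            · exact hx ▸ hb
            · exact lt_of_lt_of_le (hx ▸ hb) (hy z hz')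
          simp [hlt.ne']
        rw [List.filter_cons, hnil]
        simp [hx]
      · rw [List.filter_cons]
        simp [hx]
    · rw [if_neg hb, List.filter_cons, List.filter_cons, ih hys]
      by_cases hyk : y.1 = k <;> simp [hyk]

lemma mm_sorted_filter (k : String) (ts : List (String × String)) :
    (PySem.List.sorted ts (fun p => p.1) false).filter (fun p => p.1 == k)
    = ts.filter (fun p => p.1 == k) := by
  induction ts using List.reverseRecOn with
  | nil => rfl
  | append_singleton ts x ih =>
    have hstep : PySem.List.sorted (ts ++ [x]) (fun p => p.1) false
        = PySem.List.insertBy (fun a b => decide (a.1 < b.1)) x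
            (PySem.List.sorted ts (fun p => p.1) false) := by
      simp [PySem.List.sorted]
    rw [hstep, mm_insertBy_filter x k _ (PySem.List.sorted_pairwise ts (fun p => p.1)),
      ih, List.filter_append]
    by_cases hx : x.1 = k <;> simp [hx]

lemma mm_ofList_append_singleton (K : List String) (k : String) :
    PySem.Set.ofList (K ++ [k])
    = if k ∈ PySem.Set.ofList K then PySem.Set.ofList K else PySem.Set.ofList K ++ [k] := by
  have h1 : PySem.Set.ofList (K ++ [k]) = PySem.Set.add (PySem.Set.ofList K) k := by
    simp [PySem.Set.ofList, List.foldl_append]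
  rw [h1, PySem.Set.add]
  by_cases h : k ∈ PySem.Set.ofList K
  · rw [if_pos (by simpa [PySem.Set.contains] using h), if_pos h]
  · rw [if_neg (by simpa [PySem.Set.contains] using h), if_neg h]

lemma mm_ofList_sublist (K : List String) : (PySem.Set.ofList K).Sublist K := by
  induction K using List.reverseRecOn with
  | nil => simp [PySem.Set.ofList, PySem.Set.empty]
  | append_singleton K k ih =>
    rw [mm_ofList_append_singleton]
    by_cases h : k ∈ PySem.Set.ofList K
    · rw [if_pos h]
      exact ih.trans (List.sublist_append_left K [k])
    · rw [if_neg h]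
      exact List.Sublist.append ih (List.Sublist.refl [k])

lemma mm_pairwise_lt_ofList (K : List String) (h : K.Pairwise (· ≤ ·)) :
    (PySem.Set.ofList K).Pairwise (· < ·) := by
  have h1 : (PySem.Set.ofList K).Pairwise (· ≤ ·) := h.sublist (mm_ofList_sublist K)
  have h2 : (PySem.Set.ofList K).Pairwise (· ≠ ·) := PySem.Set.nodup_ofList K
  exact (h1.and h2).imp (fun hab => lt_of_le_of_ne hab.1 hab.2)

lemma mm_last_of_max (D : List String) (hD : D.Pairwise (· < ·)) (k : String)
    (hk : k ∈ D) (hmax : ∀ m ∈ D, m ≤ k) : D.getLast? = some k := by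
  induction D with
  | nil => cases hk
  | cons a D' ih =>
    rcases D' with _ | ⟨b, D''⟩
    · obtain rfl := List.mem_singleton.mp hk
      rfl
    · have ha : ∀ z ∈ b :: D'', a < z := (List.pairwise_cons.mp hD).1
      have hD' : (b :: D'').Pairwise (· < ·) := (List.pairwise_cons.mp hD).2
      have hk' : k ∈ b :: D'' := by
        rcases List.mem_cons.mp hk with rfl | h'
        · exfalso
          have hb := ha b (by simp)
          have hub := hmax b (by simp)
          exact absurd (lt_of_le_of_lt hub hb) (lt_irrefl _)
        · exact h'
      rw [List.getLast?_cons_cons]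
      exact ih hD' hk' (fun m hm => hmax m (List.mem_cons_of_mem a hm))

lemma mm_concat_of_ne_nil (L : List String) (hL : L ≠ []) : ∃ L' m, L = L' ++ [m] := by
  induction L using List.reverseRecOn with
  | nil => exact absurd rfl hL
  | append_singleton L' m _ => exact ⟨L', m, rfl⟩

lemma mm2Step_concat_same (gs : List (String × List String)) (vs : List String)
    (p : String × String) :
    mm2Step (gs ++ [(p.1, vs)]) p = gs ++ [(p.1, vs ++ [p.2])] := by
  simp [mm2Step, List.getLast?_concat, List.dropLast_concat]

lemma mm2Step_concat_ne (gs : List (String × List String)) (k : String) (vs : List String)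
    (p : String × String) (hk : (k == p.1) = false) :
    mm2Step (gs ++ [(k, vs)]) p = (gs ++ [(k, vs)]) ++ [(p.1, [p.2])] := by
  simp [mm2Step, List.getLast?_concat, hk]

lemma mm_group_step (ps : List (String × String)) (x : String × String)
    (hps : ps.Pairwise (fun a b => a.1 ≤ b.1)) (hmax : ∀ p ∈ ps, p.1 ≤ x.1) :
    mm2Step ((PySem.Set.ofList (ps.map Prod.fst)).map
        (fun k => (k, (ps.filter (fun p => p.1 == k)).map Prod.snd))) x
    = (PySem.Set.ofList ((ps ++ [x]).map Prod.fst)).map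
        (fun k => (k, ((ps ++ [x]).filter (fun p => p.1 == k)).map Prod.snd)) := by
  have hfilt : ∀ k, (ps ++ [x]).filter (fun p => p.1 == k)
      = ps.filter (fun p => p.1 == k) ++ (if x.1 == k then [x] else []) := by
    intro k
    rw [List.filter_append]
    by_cases hx : x.1 = k <;> simp [hx]
  by_cases hnil : ps = []
  · subst hnil
    simp [mm2Step, PySem.Set.ofList, PySem.Set.add, PySem.Set.empty, PySem.Set.contains]
  · have hKle : (ps.map Prod.fst).Pairwise (· ≤ ·) := List.pairwise_map.mpr hps
    have hDlt := mm_pairwise_lt_ofList _ hKle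
    have hDnd := PySem.Set.nodup_ofList (ps.map Prod.fst)
    have hDmax : ∀ m ∈ PySem.Set.ofList (ps.map Prod.fst), m ≤ x.1 := by
      intro m hm
      obtain ⟨p, hp, hpm⟩ := List.mem_map.mp ((PySem.Set.mem_ofList _ m).mp hm)
      exact hpm ▸ hmax p hp
    have hDne : PySem.Set.ofList (ps.map Prod.fst) ≠ [] := by
      cases ps with
      | nil => exact absurd rfl hnil
      | cons q qs => exact List.ne_nil_of_mem ((PySem.Set.mem_ofList _ q.1).mpr (by simp))
    obtain ⟨D', m, hD'⟩ := mm_concat_of_ne_nil _ hDne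
    simp only [List.map_append, List.map_cons, List.map_nil]
    rw [mm_ofList_append_singleton]
    by_cases hmem : x.1 ∈ PySem.Set.ofList (ps.map Prod.fst)
    · have hlast : (PySem.Set.ofList (ps.map Prod.fst)).getLast? = some x.1 :=
        mm_last_of_max _ hDlt x.1 hmem hDmax
      obtain rfl : m = x.1 := by
        rw [hD', List.getLast?_concat] at hlast
        exact Option.some_injective _ hlast
      have hD'ne : ∀ d ∈ D', d ≠ x.1 := by
        intro d hd hc
        have hnd := hD' ▸ hDnd
        rcases List.nodup_append.mp hnd with ⟨-, -, hdis⟩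
        exact hdis d hd x.1 (by simp) hc
      rw [if_pos hmem, hD']
      simp only [List.map_append, List.map_cons, List.map_nil]
      rw [mm2Step_concat_same]
      congr 1
      · apply List.map_congr_left
        intro d hd
        have hne : (x.1 == d) = false :=
          beq_eq_false_iff_ne.mpr (fun hc => hD'ne d hd hc.symm)
        rw [hfilt d]
        simp [hne]
      · rw [hfilt x.1]
        simp
    · have hmD : m ∈ PySem.Set.ofList (ps.map Prod.fst) := by rw [hD']; simp
      have hmne : (m == x.1) = false := beq_eq_false_iff_ne.mpr (by
        intro hc
        exact hmem (hc ▸ hmD))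
      have hL : mm2Step ((PySem.Set.ofList (ps.map Prod.fst)).map
            (fun k => (k, (ps.filter (fun p => p.1 == k)).map Prod.snd))) x
          = (PySem.Set.ofList (ps.map Prod.fst)).map
              (fun k => (k, (ps.filter (fun p => p.1 == k)).map Prod.snd))
            ++ [(x.1, [x.2])] := by
        rw [hD']
        simp only [List.map_append, List.map_cons, List.map_nil]
        rw [mm2Step_concat_ne _ _ _ _ hmne]
      rw [hL, if_neg hmem]
      simp only [List.map_append, List.map_cons, List.map_nil]
      congr 1
      · apply List.map_congr_left
        intro d hd
        have hne : (x.1 == d) = false :=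
          beq_eq_false_iff_ne.mpr (fun hc => hmem (by rw [hc]; exact hd))
        rw [hfilt d]
        simp [hne]
      · have hxK : x.1 ∉ ps.map Prod.fst := fun hc => hmem ((PySem.Set.mem_ofList _ x.1).mpr hc)
        have hnilf : ps.filter (fun p => p.1 == x.1) = [] := by
          rw [List.filter_eq_nil_iff]
          intro p hp hc
          exact hxK (List.mem_map.mpr ⟨p, hp, by simpa using hc⟩)
        rw [hfilt x.1, hnilf]
        simp

lemma mm_group (ps : List (String × String)) (h : ps.Pairwise (fun a b => a.1 ≤ b.1)) :
    ps.foldl mm2Step []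
    = (PySem.Set.ofList (ps.map Prod.fst)).map
        (fun k => (k, (ps.filter (fun p => p.1 == k)).map Prod.snd)) := by
  induction ps using List.reverseRecOn with
  | nil => rfl
  | append_singleton ps x ih =>
    have hsplit := List.pairwise_append.mp h
    rw [List.foldl_append, ih hsplit.1]
    simp only [List.foldl_cons, List.foldl_nil]
    exact mm_group_step ps x hsplit.1 (fun p hp => hsplit.2.2 p hp x (by simp))

lemma mm_sorted_keys (ts : List (String × String)) :
    PySem.List.sorted (PySem.Set.ofList (ts.map Prod.fst)) (fun w => w) false
    = PySem.Set.ofList ((PySem.List.sorted ts (fun p => p.1) false).map Prod.fst) := by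
  apply PySem.List.sorted_eq_of_perm_of_pairwise_lt
  · apply (List.perm_ext_iff_of_nodup (PySem.Set.nodup_ofList _) (PySem.Set.nodup_ofList _)).mpr
    intro a
    rw [PySem.Set.mem_ofList, PySem.Set.mem_ofList]
    constructor
    · intro ha
      obtain ⟨p, hp, hpa⟩ := List.mem_map.mp ha
      exact List.mem_map.mpr ⟨p, (PySem.List.mem_sorted ts (fun p => p.1) false p).mp hp, hpa⟩
    · intro ha
      obtain ⟨p, hp, hpa⟩ := List.mem_map.mp ha
      exact List.mem_map.mpr ⟨p, (PySem.List.mem_sorted ts (fun p => p.1) false p).mpr hp, hpa⟩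
  · apply mm_pairwise_lt_ofList
    exact List.pairwise_map.mpr (PySem.List.sorted_pairwise ts (fun p => p.1))

lemma mm_B_eq_canon (l : List String) : markov_model_2_alt l = mmCanon (mmTrans l) := by
  have htr : (l.zip ((PySem.List.slice l (some 1) none).zip (PySem.List.slice l (some 2) none))).map
      (fun t => (PySem.Str.join " " [t.1, t.2.1], t.2.2)) = mmTrans l := by
    simp [pysem, mmTrans]
  simp only [markov_model_2_alt, htr]
  set st := PySem.List.sorted (mmTrans l) (fun p => p.1) false with hst
  rw [mm_group st (PySem.List.sorted_pairwise (mmTrans l) (fun p => p.1))]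
  set groups := (PySem.Set.ofList (st.map Prod.fst)).map
    (fun k => (k, (st.filter (fun p => p.1 == k)).map Prod.snd)) with hgroups
  have hgf : groups.map Prod.fst = PySem.Set.ofList (st.map Prod.fst) := by
    have hcomp : (Prod.fst ∘ fun k : String => (k, (st.filter (fun p => p.1 == k)).map Prod.snd))
        = id := funext (fun k => rfl)
    rw [hgroups, List.map_map, hcomp, List.map_id]
  have hnd : (groups.map Prod.fst).Nodup := by
    rw [hgf]; exact PySem.Set.nodup_ofList _
  have hitems := PySem.Dict.items_foldl_insert_fresh groups Prod.fst Prod.snd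
    PySem.Dict.empty (by intro a _; rfl) hnd
  have hof : (PySem.Dict.ofList groups).items = groups := by
    rw [PySem.Dict.ofList, PySem.Dict.update]
    rw [hitems]
    simp [PySem.Dict.empty]
  rw [hof, hgroups]
  simp only [mmCanon, mmVals]
  rw [← mm_sorted_keys]
  apply List.map_congr_left
  intro k _
  rw [mm_sorted_filter]

-- ===== VERDICT (by name: the statement is the Claim_ definition above) =====
theorem markov_model_2_spec : Claim_equal_markov_model_2 := by
  intro corpus _
  unfold Spec_markov_model_2
  rw [mm_A_eq_canon, mm_B_eq_canon]
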